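-- pv_equiv track=rewrite | github.com/LeeDayday/python-alg | src/12implementation/12-3.py | solution
-- ===== SOURCE A (Python) =====
-- def solution(s):
--     answer = len(s)
--     n = len(s)
--     # 문자열을 i개 단위로 자르기 (1개 ~ n/2)
--     for i in range(1, n // 2 + 1):
--         tmp = s[:i]
--         cnt = 1
--         result = ''
--         for j in range(i, n, i):
--             if tmp == s[j:j+i]:
--                 cnt += 1
--             else:
--                 result += str(cnt) + tmp if cnt >=2 else tmp
--                 tmp = s[j:j+i]
--                 cnt = 1
--         # 마지막 단어까지 추가
--         result += str(cnt) + tmp if cnt >= 2 else tmp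
--         answer = min(answer, len(result))
--
--     return answer
-- ===== SOURCE B (Python) =====
-- def rle(xs):
--     runs = []
--     while xs:
--         k = 1
--         while k < len(xs) and xs[k] == xs[0]:
--             k += 1
--         runs.append((xs[0], k))
--         xs = xs[k:]
--     return runs
--
--
-- def solution(s):
--     n = len(s)
--     best = n
--     for i in range(1, n // 2 + 1):
--         chunks = [s[j:j + i] for j in range(0, n, i)]
--         total = 0
--         for ch, c in rle(chunks):
--             total += len(ch) + (len(str(c)) if c >= 2 else 0)
--         best = min(best, total)
--     return best
-- ===== Notes on version B (the rewrite author's own statement) =====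
-- stated objective: alternative
-- what changed: A scans each unit size with a running (tmp, cnt) state while concatenating a result string and measuring it; B materialises the chunk list, run-length encodes it by repeatedly splitting off the leading equal prefix, and sums the run weights len(chunk)+digits(count) directly, never building a string.
import Mathlib
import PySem

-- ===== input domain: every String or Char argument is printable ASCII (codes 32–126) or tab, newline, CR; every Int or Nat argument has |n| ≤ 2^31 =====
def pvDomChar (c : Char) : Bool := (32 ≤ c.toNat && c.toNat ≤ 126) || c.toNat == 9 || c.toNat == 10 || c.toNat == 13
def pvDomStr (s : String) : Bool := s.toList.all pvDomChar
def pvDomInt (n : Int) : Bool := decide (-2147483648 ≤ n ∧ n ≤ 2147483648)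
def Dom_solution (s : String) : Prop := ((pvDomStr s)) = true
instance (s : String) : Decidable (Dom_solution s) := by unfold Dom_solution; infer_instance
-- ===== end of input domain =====

-- B replaces A's running (tmp, cnt, result-string) scan by: materialise the chunk list, run-length
-- encode it by repeated prefix splitting, and sum the run weights; no result string is built
-- (objective: alternative, same asymptotic cost).

-- ===== PORT A =====
def solution (s : String) : Int :=
  (PySem.List.pyRange 1 (PySem.Int.floordiv (PySem.List.len s.toList) 2 + 1) 1).foldl
    (fun answer i =>
      let st := (PySem.List.pyRange i (PySem.List.len s.toList) i).foldl
        (fun (st : List Char × Int × List Char) j =>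
          if st.1 = PySem.List.slice s.toList (some j) (some (j + i)) then
            (st.1, st.2.1 + 1, st.2.2)
          else
            (PySem.List.slice s.toList (some j) (some (j + i)), 1,
              st.2.2 ++ (if st.2.1 ≥ 2 then PySem.Int.toChars st.2.1 ++ st.1 else st.1)))
        (PySem.List.slice s.toList none (some i), 1, ([] : List Char))
      min answer (PySem.List.len (st.2.2 ++ (if st.2.1 ≥ 2 then PySem.Int.toChars st.2.1 ++ st.1 else st.1))))
    (PySem.List.len s.toList)


-- ===== PORT B =====
-- Source B's `rle`: peel off the leading run (the hand-counted equal prefix is `takeWhile`'s length), recurse on the rest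
def rleRuns (xs : List (List Char)) : List (List Char × Int) :=
  match xs with
  | [] => []
  | x :: rest =>
    let k := (rest.takeWhile (· == x)).length
    (x, 1 + (k : Int)) :: rleRuns (rest.drop k)
termination_by xs.length
decreasing_by simp


def solution_alt (s : String) : Int :=
  (PySem.List.pyRange 1 (PySem.Int.floordiv (PySem.List.len s.toList) 2 + 1) 1).foldl
    (fun best i =>
      let chunks := (PySem.List.pyRange 0 (PySem.List.len s.toList) i).map
        (fun j => PySem.List.slice s.toList (some j) (some (j + i)))
      (rleRuns chunks).foldl
        (fun acc p => acc + (PySem.List.len p.1 +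
          (if p.2 ≥ 2 then PySem.List.len (PySem.Int.toChars p.2) else 0))) 0
      |> min best)
    (PySem.List.len s.toList)

-- ===== PRECONDITION & SPEC =====
def Spec_solution (s : String) (out : Int) : Prop := out = solution_alt s
instance (s : String) (out : Int) : Decidable (Spec_solution s out) := by unfold Spec_solution; infer_instance

-- ===== CLAIM (what is proved, stated in full; the proofs are below) =====
def Claim_equal_solution : Prop := ∀ (s : String), Dom_solution s → Spec_solution s (solution s)

-- ===== LEMMAS AND PROOFS =====

lemma rleRuns_nil : rleRuns [] = [] := by rw [rleRuns]

lemma rleRuns_cons (x : List Char) (rest : List (List Char)) :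
    rleRuns (x :: rest)
      = (x, 1 + ((rest.takeWhile (· == x)).length : Int))
        :: rleRuns (rest.drop (rest.takeWhile (· == x)).length) := by
  rw [rleRuns]

lemma pyRange_cons_of_pos (a b i : Int) (hi : 0 < i) (hab : a < b) :
    PySem.List.pyRange a b i = a :: PySem.List.pyRange (a + i) b i := by
  unfold PySem.List.pyRange
  have hi0 : i ≠ 0 := by omega
  simp only [hi0, if_false, if_pos hi, if_pos hab]
  have key : ((b - a + i - 1) / i).toNat
      = (if a + i < b then ((b - (a + i) + i - 1) / i).toNat else 0) + 1 := by
    have h1 : b - a + i - 1 = (b - a - 1) + 1 * i := by ring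
    have h2 : (b - a + i - 1) / i = (b - a - 1) / i + 1 := by
      rw [h1, Int.add_mul_ediv_right _ _ hi0]
    by_cases hc : a + i < b
    · simp only [if_pos hc]
      have h3 : b - (a + i) + i - 1 = b - a - 1 := by ring
      rw [h3, h2]
      have hq : 0 ≤ (b - a - 1) / i := Int.ediv_nonneg (by omega) (by omega)
      omega
    · simp only [if_neg hc]
      have hz : (b - a - 1) / i = 0 := Int.ediv_eq_zero_of_lt (by omega) (by omega)
      rw [h2, hz]
      omega
  rw [key, List.range_succ_eq_map, List.map_cons, List.map_map]
  refine congrArg₂ _ (by simp) ?_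
  apply List.map_congr_left
  intro k _
  simp [Function.comp]
  ring

def stepA (st : List Char × Int × List Char) (c : List Char) : List Char × Int × List Char :=
  if st.1 = c then (st.1, st.2.1 + 1, st.2.2)
  else (c, 1, st.2.2 ++ (if st.2.1 ≥ 2 then PySem.Int.toChars st.2.1 ++ st.1 else st.1))

def encL (cnt : Int) (tmp : List Char) : Int :=
  (((if cnt ≥ 2 then PySem.Int.toChars cnt ++ tmp else tmp) : List Char).length : Int)

def runG (p : List Char × Int) : Int :=
  PySem.List.len p.1 + (if p.2 ≥ 2 then PySem.List.len (PySem.Int.toChars p.2) else 0)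

def rleSum (xs : List (List Char)) : Int := ((rleRuns xs).map runG).sum

def tailSum (tmp : List Char) (cnt : Int) : List (List Char) → Int
  | [] => encL cnt tmp
  | x :: xs => if x = tmp then tailSum tmp (cnt + 1) xs else encL cnt tmp + tailSum x 1 xs

lemma encL_eq_runG (cnt : Int) (tmp : List Char) : encL cnt tmp = runG (tmp, cnt) := by
  unfold encL runG
  split
  · simp [PySem.List.len_eq]; ring
  · simp [PySem.List.len_eq]

lemma foldA_len (cs : List (List Char)) : ∀ (tmp : List Char) (cnt : Int) (res : List Char),
    (((cs.foldl stepA (tmp, cnt, res)).2.2 ++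
        (if (cs.foldl stepA (tmp, cnt, res)).2.1 ≥ 2 then
          PySem.Int.toChars (cs.foldl stepA (tmp, cnt, res)).2.1 ++ (cs.foldl stepA (tmp, cnt, res)).1
         else (cs.foldl stepA (tmp, cnt, res)).1)).length : Int)
      = (res.length : Int) + tailSum tmp cnt cs := by
  induction cs with
  | nil =>
    intro tmp cnt res
    simp only [List.foldl_nil, tailSum, encL, List.length_append]
    push_cast
    ring
  | cons x xs ih =>
    intro tmp cnt res
    by_cases h : tmp = x
    · rw [List.foldl_cons, show stepA (tmp, cnt, res) x = (tmp, cnt + 1, res) from by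
        simp [stepA, h], ih tmp (cnt + 1) res]
      have hx : x = tmp := h.symm
      rw [show tailSum tmp cnt (x :: xs) = tailSum tmp (cnt + 1) xs from by
        simp [tailSum, hx]]
    · rw [List.foldl_cons, show stepA (tmp, cnt, res) x
          = (x, 1, res ++ (if cnt ≥ 2 then PySem.Int.toChars cnt ++ tmp else tmp)) from by
        simp [stepA, h], ih x 1 _]
      have hx : ¬ (x = tmp) := fun hc => h hc.symm
      rw [show tailSum tmp cnt (x :: xs) = encL cnt tmp + tailSum x 1 xs from by
        simp [tailSum, hx]]
      simp only [List.length_append, encL]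
      push_cast
      ring

lemma tailSum_eq (cs : List (List Char)) : ∀ (c : List Char) (cnt : Int),
    tailSum c cnt cs
      = encL (cnt + ((cs.takeWhile (· == c)).length : Int)) c
        + rleSum (cs.drop (cs.takeWhile (· == c)).length) := by
  induction cs with
  | nil =>
    intro c cnt
    simp [tailSum, rleSum, rleRuns_nil]
  | cons x xs ih =>
    intro c cnt
    by_cases h : x = c
    · have ht : (x :: xs).takeWhile (· == c) = x :: xs.takeWhile (· == c) := by
        simp [h]
      rw [ht, show tailSum c cnt (x :: xs) = tailSum c (cnt + 1) xs from by
        simp [tailSum, h], ih c (cnt + 1)]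
      have harg : cnt + 1 + ((xs.takeWhile (· == c)).length : Int)
          = cnt + (((x :: xs.takeWhile (· == c)).length : Nat) : Int) := by
        push_cast [List.length_cons]; ring
      rw [harg]
      simp
    · have ht : (x :: xs).takeWhile (· == c) = [] := by
        simp [h]
      rw [ht, show tailSum c cnt (x :: xs) = encL cnt c + tailSum x 1 xs from by
        simp [tailSum, h], ih x 1]
      have hr : rleSum (x :: xs)
          = runG (x, 1 + ((xs.takeWhile (· == x)).length : Int))
            + rleSum (xs.drop (xs.takeWhile (· == x)).length) := by
        rw [rleSum, rleRuns_cons, List.map_cons, List.sum_cons, rleSum]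
      simp only [List.length_nil, List.drop_zero, Nat.cast_zero, add_zero, hr, encL_eq_runG]


def aInner (cs : List Char) (i : Int) : Int :=
  let st := (PySem.List.pyRange i (PySem.List.len cs) i).foldl
    (fun st j => stepA st (PySem.List.slice cs (some j) (some (j + i))))
    (PySem.List.slice cs none (some i), 1, ([] : List Char))
  PySem.List.len (st.2.2 ++ (if st.2.1 ≥ 2 then PySem.Int.toChars st.2.1 ++ st.1 else st.1))

def bInner (cs : List Char) (i : Int) : Int :=
  (rleRuns ((PySem.List.pyRange 0 (PySem.List.len cs) i).map
    (fun j => PySem.List.slice cs (some j) (some (j + i))))).foldl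
    (fun acc p => acc + runG p) 0

lemma inner_eq (cs : List Char) (i : Int) (hi : 1 ≤ i) (hn : 0 < PySem.List.len cs) :
    aInner cs i = bInner cs i := by
  unfold aInner bInner
  have hcons : PySem.List.pyRange 0 (PySem.List.len cs) i
      = 0 :: PySem.List.pyRange i (PySem.List.len cs) i := by
    have := pyRange_cons_of_pos 0 (PySem.List.len cs) i (by omega) hn
    rwa [zero_add] at this
  rw [hcons, List.map_cons]
  have hhead : PySem.List.slice cs (some (0 : Int)) (some ((0 : Int) + i))
      = PySem.List.slice cs none (some i) := by
    rw [zero_add, PySem.List.slice_zero_start]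
  rw [hhead]
  rw [← List.foldl_map (f := fun j => PySem.List.slice cs (some j) (some (j + i))) (g := stepA)]
  simp only [PySem.List.len_eq]
  rw [foldA_len]
  rw [tailSum_eq]
  rw [PySem.List.foldl_add, rleRuns_cons, List.map_cons, List.sum_cons, encL_eq_runG]
  simp [rleSum]

theorem solution_eq_alt (s : String) : solution s = solution_alt s := by
  unfold solution solution_alt
  apply PySem.List.foldl_congr_mem
  intro acc i hmem
  have hi : 1 ≤ i ∧ i < PySem.Int.floordiv (PySem.List.len s.toList) 2 + 1 := by
    simpa [PySem.List.mem_pyRange_one] using hmem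
  have hn : 0 < PySem.List.len s.toList := by
    have := hi.1; have := hi.2
    simp only [PySem.Int.floordiv] at *
    rw [Int.fdiv_eq_ediv] at *
    simp [PySem.List.len_eq] at *
    omega
  show min acc (aInner s.toList i) = min acc (bInner s.toList i)
  rw [inner_eq s.toList i hi.1 hn]

-- ===== VERDICT (by name: the statement is the Claim_ definition above) =====
theorem solution_spec : Claim_equal_solution := by
  intro s _
  unfold Spec_solution
  exact solution_eq_alt s
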